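-- pv_equiv track=rewrite | github.com/ricohapi/camera-control-sample-py | ricohapi/cameractl/mqtt_client.py | escape_username
-- ===== SOURCE A (Python) =====
-- ESCAPE_TRANSFORMATIONS = {'+': '%2B',
--                           '#': '%23',
--                           '/': '%2F',
--                           '%': '%25'}
--
-- def escape_username(username):
--     """Escape of the local portion of a username."""
--     result = []
--     for i, char in enumerate(username):
--         result.append(char)
--
--     for i, char in enumerate(username):
--         result[i] = ESCAPE_TRANSFORMATIONS.get(char, char)
--
--     escaped = ''.join(result)
--
--     return escaped
-- ===== SOURCE B (Python) =====
-- def escape_username(username):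
--     """Escape of the local portion of a username."""
--     return (username.replace('%', '%25')
--                     .replace('+', '%2B')
--                     .replace('#', '%23')
--                     .replace('/', '%2F'))
-- ===== Notes on version B (the rewrite author's own statement) =====
-- stated objective: idiomatic
-- what changed: Replaced the build-a-list-then-overwrite-each-cell-then-join two-pass loop with four chained str.replace scans ('%' first so emitted percent signs are not re-escaped).
import Mathlib
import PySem

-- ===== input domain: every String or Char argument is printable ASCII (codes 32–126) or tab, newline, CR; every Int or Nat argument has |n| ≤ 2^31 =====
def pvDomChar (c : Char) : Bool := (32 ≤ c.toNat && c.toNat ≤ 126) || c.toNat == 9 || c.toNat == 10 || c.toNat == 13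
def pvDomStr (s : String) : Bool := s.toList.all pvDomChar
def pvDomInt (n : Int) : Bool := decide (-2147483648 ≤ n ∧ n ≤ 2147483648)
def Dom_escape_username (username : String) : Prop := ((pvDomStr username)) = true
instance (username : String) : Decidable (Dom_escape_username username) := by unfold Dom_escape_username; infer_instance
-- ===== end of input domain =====

-- B replaces A's build-list / overwrite-each-cell / join two-pass loop by four chained
-- str.replace scans ('%' first so emitted percent signs are not re-escaped): idiomatic.

-- ===== PORT A =====
-- module constant ESCAPE_TRANSFORMATIONS (dict keyed by 1-char strings)
def ESCAPE_TRANSFORMATIONS : PySem.Dict String String :=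
  ((((PySem.Dict.empty).insert "+" "%2B").insert "#" "%23").insert "/" "%2F").insert "%" "%25"

def escape_username (username : String) : String :=
  -- result = []; for i, char in enumerate(username): result.append(char)
  let result : List String :=
    (PySem.List.enumerate username.toList).foldl
      (fun r p => r ++ [String.singleton p.2]) []
  -- for i, char in enumerate(username): result[i] = ESCAPE_TRANSFORMATIONS.get(char, char)
  let result : List String :=
    (PySem.List.enumerate username.toList).foldl
      (fun r p => PySem.List.pySetD r p.1
        (ESCAPE_TRANSFORMATIONS.getD (String.singleton p.2) (String.singleton p.2))) result
  -- escaped = ''.join(result)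
  PySem.Str.join "" result

-- ===== PORT B =====
def escape_username_alt (username : String) : String :=
  PySem.Str.replace (PySem.Str.replace (PySem.Str.replace
    (PySem.Str.replace username "%" "%25") "+" "%2B") "#" "%23") "/" "%2F"

-- ===== PRECONDITION & SPEC =====
def Spec_escape_username (username : String) (out : String) : Prop := out = escape_username_alt username
instance (username : String) (out : String) : Decidable (Spec_escape_username username out) := by unfold Spec_escape_username; infer_instance

-- ===== CLAIM (what is proved, stated in full; the proofs are below) =====
def Claim_equal_escape_username : Prop := ∀ (username : String), Dom_escape_username username → Spec_escape_username username (escape_username username)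

-- ===== LEMMAS AND PROOFS =====

-- replacing a single character is a per-character flatMap
lemma replace_go_single (o : Char) (new : List Char) :
    ∀ (fuel : Nat) (l acc : List Char), l.length ≤ fuel →
      PySem.Chars.replace.go [o] new fuel l acc
        = acc.reverse ++ l.flatMap (fun c => if c = o then new else [c]) := by
  intro fuel
  induction fuel with
  | zero =>
    intro l acc h
    have : l = [] := List.eq_nil_of_length_eq_zero (Nat.le_zero.mp h)
    subst this
    simp [PySem.Chars.replace.go]
  | succ n ih =>
    intro l acc h
    cases l with
    | nil => simp [PySem.Chars.replace.go]
    | cons c t =>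
      by_cases hc : c = o
      · subst hc
        have hpre : List.isPrefixOf [c] (c :: t) = true := by
          simp [List.isPrefixOf]
        simp only [PySem.Chars.replace.go, hpre, if_pos]
        have hdrop : List.drop [c].length (c :: t) = t := rfl
        rw [hdrop, ih t (new.reverse ++ acc) (by simpa using Nat.lt_succ_iff.mp (by simpa using h))]
        simp
      · have hpre : List.isPrefixOf [o] (c :: t) = false := by
          simp [List.isPrefixOf]
          intro h'
          exact hc h'.symm
        simp only [PySem.Chars.replace.go, hpre]
        rw [ih t (c :: acc) (by simpa using Nat.lt_succ_iff.mp (by simpa using h))]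
        simp [hc]

lemma replace_single (o : Char) (new cs : List Char) :
    PySem.Chars.replace cs [o] new = cs.flatMap (fun c => if c = o then new else [c]) := by
  rw [PySem.Chars.replace]
  rw [if_neg (by simp : ¬ (List.isEmpty [o] = true))]
  simpa using replace_go_single o new cs.length cs [] (le_refl _)

-- the per-character escape both programs perform (as a character list)
def escChar (c : Char) : List Char :=
  if c = '+' then ['%','2','B']
  else if c = '#' then ['%','2','3']
  else if c = '/' then ['%','2','F']
  else if c = '%' then ['%','2','5']
  else [c]

-- A's overwrite loop turns the singleton-string list into the mapped list
lemma setloop (g : Char → String) :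
    ∀ (cs : List Char) (pre post : List String), post.length = cs.length →
      (PySem.List.enumerate cs (pre.length : Int)).foldl
          (fun r p => PySem.List.pySetD r p.1 (g p.2)) (pre ++ post)
        = pre ++ cs.map g := by
  intro cs
  induction cs with
  | nil =>
    intro pre post h
    have : post = [] := List.eq_nil_of_length_eq_zero h
    simp [PySem.List.enumerate, this]
  | cons c t ih =>
    intro pre post h
    cases post with
    | nil => simp at h
    | cons s post' =>
      rw [PySem.List.enumerate_cons]
      simp only [List.foldl_cons]
      have hset : PySem.List.pySetD (pre ++ s :: post') ((pre.length : Int)) (g c)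
          = (pre ++ [g c]) ++ post' := by
        simp [PySem.List.pySetD_natCast, List.set_append_right, List.append_assoc]
      rw [hset]
      have hlen : ((pre.length : Int) + 1) = (((pre ++ [g c]).length : Nat) : Int) := by
        simp
      rw [hlen, ih (pre ++ [g c]) post' (by simpa using h)]
      simp

-- ''.join splits off its head piece
lemma join_empty_cons (s : String) (rest : List String) :
    (PySem.Str.join "" (s :: rest)).toList = s.toList ++ (PySem.Str.join "" rest).toList := by
  cases rest with
  | nil => simp [PySem.Str.join, PySem.Chars.join, List.intercalate]
  | cons r rs => simp [PySem.Str.join, PySem.Chars.join, List.intercalate]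

-- joining A's mapped pieces concatenates escChar per character
lemma join_map_eq (cs : List Char) :
    (PySem.Str.join "" (cs.map (fun c =>
        ESCAPE_TRANSFORMATIONS.getD (String.singleton c) (String.singleton c)))).toList
      = cs.flatMap escChar := by
  induction cs with
  | nil => decide
  | cons c t ih =>
    simp only [List.map_cons, List.flatMap_cons, ← ih]
    rw [join_empty_cons]
    congr 1
    by_cases h1 : c = '+'
    · subst h1; decide
    by_cases h2 : c = '#'
    · subst h2; decide
    by_cases h3 : c = '/'
    · subst h3; decide
    by_cases h4 : c = '%'
    · subst h4; decide
    · simp [ESCAPE_TRANSFORMATIONS, escChar, h1, h2, h3, h4,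
        PySem.Dict.getD, PySem.Dict.get?, PySem.Dict.insert, PySem.Dict.empty,
        String.singleton, String.ext_iff, Ne.symm h1, Ne.symm h2, Ne.symm h3, Ne.symm h4]

-- the composed per-character effect of B's four chained replaces is escChar
lemma chain_char (c : Char) :
    List.flatMap
      (fun x => List.flatMap
        (fun x => List.flatMap (fun c => if c = '/' then ['%','2','F'] else [c])
          (if x = '#' then ['%','2','3'] else [x]))
        (if x = '+' then ['%','2','B'] else [x]))
      (if c = '%' then ['%','2','5'] else [c])
      = escChar c := by
  by_cases h1 : c = '+'
  · subst h1; decide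
  by_cases h2 : c = '#'
  · subst h2; decide
  by_cases h3 : c = '/'
  · subst h3; decide
  by_cases h4 : c = '%'
  · subst h4; decide
  · simp [escChar, h1, h2, h3, h4]

-- B's four chained single-character replaces concatenate escChar per character
lemma alt_eq_flatMap (cs : List Char) :
    PySem.Chars.replace (PySem.Chars.replace (PySem.Chars.replace
        (PySem.Chars.replace cs ['%'] ['%','2','5'])
        ['+'] ['%','2','B']) ['#'] ['%','2','3']) ['/'] ['%','2','F']
      = cs.flatMap escChar := by
  simp only [replace_single, List.flatMap_assoc]
  exact List.flatMap_congr (fun c _ => chain_char c)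

-- ===== VERDICT (by name: the statement is the Claim_ definition above) =====
theorem escape_username_spec : Claim_equal_escape_username := by
  intro username _
  unfold Spec_escape_username
  show PySem.Str.join ""
      ((PySem.List.enumerate username.toList).foldl
        (fun r p => PySem.List.pySetD r p.1
          (ESCAPE_TRANSFORMATIONS.getD (String.singleton p.2) (String.singleton p.2)))
        ((PySem.List.enumerate username.toList).foldl
          (fun r p => r ++ [String.singleton p.2]) []))
    = escape_username_alt username
  rw [PySem.List.foldl_append_singleton_eq_map (fun p : Int × Char => String.singleton p.2)]
  rw [show (PySem.List.enumerate username.toList).map (fun p : Int × Char => String.singleton p.2)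
        = username.toList.map String.singleton by
      rw [show (fun p : Int × Char => String.singleton p.2)
            = String.singleton ∘ (fun p : Int × Char => p.2) from rfl]
      rw [← List.map_map, PySem.List.map_snd_enumerate]]
  rw [show ([] : List String) ++ username.toList.map String.singleton
        = username.toList.map String.singleton from rfl]
  have h2 : (PySem.List.enumerate username.toList).foldl
      (fun r p => PySem.List.pySetD r p.1
        (ESCAPE_TRANSFORMATIONS.getD (String.singleton p.2) (String.singleton p.2)))
      (username.toList.map String.singleton)
      = username.toList.map
          (fun c => ESCAPE_TRANSFORMATIONS.getD (String.singleton c) (String.singleton c)) := by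
    exact setloop
      (fun c => ESCAPE_TRANSFORMATIONS.getD (String.singleton c) (String.singleton c))
      username.toList [] (username.toList.map String.singleton) (by simp)
  rw [h2]
  apply String.toList_inj.mp
  rw [join_map_eq]
  show _ = (PySem.Str.replace (PySem.Str.replace (PySem.Str.replace
    (PySem.Str.replace username "%" "%25") "+" "%2B") "#" "%23") "/" "%2F").toList
  rw [PySem.Str.toList_replace, PySem.Str.toList_replace, PySem.Str.toList_replace,
    PySem.Str.toList_replace]
  exact (alt_eq_flatMap username.toList).symm
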